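-- pv_equiv track=rewrite | github.com/FacundoOZ/University-of-Buenos-Aires | MSc-in-Computer-Science/Algoritmos 1/guías/6_Funciones_sobre_Listas.py | columnas_ordenadas
-- ===== SOURCE A (Python) =====
-- def ordenados(s: list[int]) -> bool:
--   res: bool = False
--   if len(s) == 1: # Agrego un caso especial
--     res = True
--   for i in range(len(s)-1):
--     if s[i] < s[i+1]:
--       res = True
--     else:
--       res = False
--       break
--   return res
--
-- def columna(m: list[list[int]], c: int) -> list[int]:
--   res: list[int] = []
--   for i in range(len(m)):
--     res.append(m[i][c])
--   return res
--
-- def columnas_ordenadas(m: list[list[int]]) -> list[bool]: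
--   res: list[bool] = []
--   for i in range(len(m[0])): # elijo a la primer fila ([0]) como referencia, solo por elegir (las filas tienen la misma longitud)
--     if ordenados(columna(m,i)) == True:
--       res.append(True)
--     else:
--       res.append(False)
--   return res
-- ===== SOURCE B (Python) =====
-- def columnas_ordenadas(m: list[list[int]]) -> list[bool]:
--     w = len(m[0])
--     res = [True] * w
--     for i in range(len(m) - 1):
--         r0 = m[i]
--         r1 = m[i + 1]
--         for c in range(w):
--             if not (r0[c] < r1[c]):
--                 res[c] = False
--     return res
-- ===== Notes on version B (the rewrite author's own statement) =====
-- stated objective: alternative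
-- what changed: Replaces the column-extraction helper plus per-column scan with a single row-major pass that keeps one running boolean per column, updated over adjacent row pairs.
import Mathlib
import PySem

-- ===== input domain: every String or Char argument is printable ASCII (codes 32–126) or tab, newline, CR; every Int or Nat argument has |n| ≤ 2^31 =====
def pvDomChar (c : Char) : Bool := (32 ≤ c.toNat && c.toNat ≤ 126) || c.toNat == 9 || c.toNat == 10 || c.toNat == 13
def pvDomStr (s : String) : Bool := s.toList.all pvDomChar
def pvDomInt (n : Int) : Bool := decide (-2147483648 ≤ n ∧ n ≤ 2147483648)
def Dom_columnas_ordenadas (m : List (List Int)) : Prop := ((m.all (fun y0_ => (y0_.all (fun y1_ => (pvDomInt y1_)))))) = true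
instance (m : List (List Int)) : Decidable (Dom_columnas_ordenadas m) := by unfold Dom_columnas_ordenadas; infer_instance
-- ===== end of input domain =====

-- B is a single row-major pass keeping one running boolean per column (alternative decomposition,
-- no column materialization); equivalence is over matrices with a first row and rows at least that wide.

-- ===== PORT A =====
-- loop with break, state (res, broken)
def ordenados (s : List Int) : Bool :=
  let res : Bool := false
  let res := if s.length == 1 then true else res
  (((PySem.List.pyRange 0 ((s.length : Int) - 1) 1).foldl
    (fun (st : Bool × Bool) i =>
      if st.2 then st
      else if PySem.List.pyGetD s i 0 < PySem.List.pyGetD s (i + 1) 0 then (true, false)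
      else (false, true))
    (res, false)) : Bool × Bool).1

def columna (m : List (List Int)) (c : Int) : List Int :=
  (PySem.List.pyRange 0 (m.length : Int) 1).foldl
    (fun res i => res ++ [PySem.List.pyGetD (PySem.List.pyGetD m i []) c 0]) []

def columnas_ordenadas (m : List (List Int)) : List Bool :=
  (PySem.List.pyRange 0 (((PySem.List.pyGetD m 0 []).length : Int)) 1).foldl
    (fun res i => if ordenados (columna m i) == true then res ++ [true] else res ++ [false]) []

-- ===== PORT B =====
def columnas_ordenadas_alt (m : List (List Int)) : List Bool :=
  let w : Int := ((PySem.List.pyGetD m 0 []).length : Int)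
  let res : List Bool := List.replicate w.toNat true
  (PySem.List.pyRange 0 ((m.length : Int) - 1) 1).foldl
    (fun res i =>
      let r0 := PySem.List.pyGetD m i []
      let r1 := PySem.List.pyGetD m (i + 1) []
      (PySem.List.pyRange 0 w 1).foldl
        (fun res c =>
          if ¬ (PySem.List.pyGetD r0 c 0 < PySem.List.pyGetD r1 c 0)
          then PySem.List.pySetD res c false else res) res)
    res

-- ===== PRECONDITION & SPEC =====
-- Pre_ excludes exactly the inputs where the Python raises IndexError: empty m (m[0]) and
-- ragged matrices whose later rows are shorter than the first row (m[i][c] in columna / the row pass).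
def Pre_columnas_ordenadas (m : List (List Int)) : Prop :=
  m ≠ [] ∧ ∀ r ∈ m, (m.headD []).length ≤ r.length
instance (m : List (List Int)) : Decidable (Pre_columnas_ordenadas m) := by
  unfold Pre_columnas_ordenadas; infer_instance
def pvWitness_columnas_ordenadas : List (List Int) := [[1, 5], [2, 4]]
def Spec_columnas_ordenadas (m : List (List Int)) (out : List Bool) : Prop := out = columnas_ordenadas_alt m
instance (m : List (List Int)) (out : List Bool) : Decidable (Spec_columnas_ordenadas m out) := by unfold Spec_columnas_ordenadas; infer_instance

-- ===== CLAIM (what is proved, stated in full; the proofs are below) =====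
def Claim_equal_columnas_ordenadas : Prop := ∀ (m : List (List Int)), Dom_columnas_ordenadas m → Pre_columnas_ordenadas m → Spec_columnas_ordenadas m (columnas_ordenadas m)


-- ===== LEMMAS AND PROOFS =====

-- the per-(row pair, column) comparison both programs make
def pvCond (m : List (List Int)) (i c : Int) : Bool :=
  decide (PySem.List.pyGetD (PySem.List.pyGetD m i []) c 0
    < PySem.List.pyGetD (PySem.List.pyGetD m (i + 1) []) c 0)

-- `all` congruence on members (Bool-valued)
theorem pvAllCongr {α : Type} {l : List α} {f g : α → Bool}
    (h : ∀ x ∈ l, f x = g x) : l.all f = l.all g := by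
  induction l with
  | nil => rfl
  | cons x xs ih =>
    simp only [List.all_cons, h x (List.mem_cons_self), ih (fun y hy => h y (List.mem_cons_of_mem x hy))]

-- once the break flag is set, the loop state is frozen
theorem pvBreakStuck (s : List Int) (l : List Int) (res : Bool) :
    l.foldl
      (fun (st : Bool × Bool) i =>
        if st.2 then st
        else if PySem.List.pyGetD s i 0 < PySem.List.pyGetD s (i + 1) 0 then (true, false)
        else (false, true))
      (res, true) = (res, true) := by
  induction l with
  | nil => rfl
  | cons x xs ih => simpa using ih

-- the loop-with-break computes the bounded `all` over the remaining range
theorem pvOrdLoop (s : List Int) (k : Nat) : ∀ (a b : Int), a < b → (b - a).toNat = k →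
    ((PySem.List.pyRange a b 1).foldl
      (fun (st : Bool × Bool) i =>
        if st.2 then st
        else if PySem.List.pyGetD s i 0 < PySem.List.pyGetD s (i + 1) 0 then (true, false)
        else (false, true))
      (false, false)).1
    = (PySem.List.pyRange a b 1).all
        (fun i => decide (PySem.List.pyGetD s i 0 < PySem.List.pyGetD s (i + 1) 0)) ∧
    ((PySem.List.pyRange a b 1).foldl
      (fun (st : Bool × Bool) i =>
        if st.2 then st
        else if PySem.List.pyGetD s i 0 < PySem.List.pyGetD s (i + 1) 0 then (true, false)
        else (false, true))
      (true, false)).1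
    = (PySem.List.pyRange a b 1).all
        (fun i => decide (PySem.List.pyGetD s i 0 < PySem.List.pyGetD s (i + 1) 0)) := by
  induction k with
  | zero => intro a b hab hk; omega
  | succ k ih =>
    intro a b hab hk
    rw [PySem.List.pyRange_one_cons hab]
    by_cases hc : PySem.List.pyGetD s a 0 < PySem.List.pyGetD s (a + 1) 0
    · by_cases hb : a + 1 < b
      · have := ih (a + 1) b hb (by omega)
        simp [List.foldl_cons, List.all_cons, hc, this.2]
      · have hnil : PySem.List.pyRange (a + 1) b 1 = [] :=
          PySem.List.pyRange_one_eq_nil (by omega)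
        simp [List.foldl_cons, List.all_cons, hc, hnil]
    · simp [List.foldl_cons, List.all_cons, hc, pvBreakStuck]

-- characterization of A's helper `ordenados` on nonempty lists
theorem pvOrdenadosChar (s : List Int) (h : s ≠ []) :
    ordenados s
    = (PySem.List.pyRange 0 ((s.length : Int) - 1) 1).all
        (fun i => decide (PySem.List.pyGetD s i 0 < PySem.List.pyGetD s (i + 1) 0)) := by
  have hlen : 1 ≤ s.length := List.length_pos_of_ne_nil h
  by_cases h1 : s.length = 1
  · have : PySem.List.pyRange 0 ((s.length : Int) - 1) 1 = [] :=
      PySem.List.pyRange_one_eq_nil (by omega)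
    rw [ordenados, this]
    simp [h1]
  · have hb : (0 : Int) < (s.length : Int) - 1 := by omega
    unfold ordenados
    simp only [beq_iff_eq, h1, if_false]
    exact (pvOrdLoop s ((s.length : Int) - 1 - 0).toNat 0 ((s.length : Int) - 1) hb rfl).1

-- A's helper `columna` is a map over the rows
theorem pvColumnaEq (m : List (List Int)) (c : Int) :
    columna m c = m.map (fun row => PySem.List.pyGetD row c 0) := by
  unfold columna
  rw [PySem.List.foldl_append_singleton_eq_map
        (fun i => PySem.List.pyGetD (PySem.List.pyGetD m i []) c 0)]
  have : (PySem.List.pyRange 0 ((m.length : Int)) 1).map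
        (fun i => PySem.List.pyGetD (PySem.List.pyGetD m i []) c 0)
      = ((PySem.List.pyRange 0 ((m.length : Int)) 1).map
          (fun i => PySem.List.pyGetD m i [])).map (fun row => PySem.List.pyGetD row c 0) := by
    rw [List.map_map]; rfl
  rw [List.nil_append, this, PySem.List.map_pyGetD_pyRange_zero']

-- A's column test, expressed against the matrix entries
theorem pvColPointwise (m : List (List Int)) (hm : m ≠ []) (c : Int) :
    ordenados (columna m c)
    = (PySem.List.pyRange 0 ((m.length : Int) - 1) 1).all
        (fun i => decide (pvCond m i c)) := by
  rw [pvColumnaEq]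
  have hne : m.map (fun row => PySem.List.pyGetD row c 0) ≠ [] := by
    simpa using hm
  rw [pvOrdenadosChar _ hne]
  simp only [List.length_map]
  refine pvAllCongr ?_
  intro i hi
  rcases PySem.List.mem_pyRange_one.1 hi with ⟨h0, h1⟩
  have hi1 : i < (m.length : Int) := by omega
  have hi2 : i + 1 < (m.length : Int) := by omega
  have e1 : PySem.List.pyGetD (m.map (fun row => PySem.List.pyGetD row c 0)) i 0
      = PySem.List.pyGetD (PySem.List.pyGetD m i []) c 0 := by
    rw [PySem.List.pyGetD_eq_getElem _ _ h0 (by simpa using hi1),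
        PySem.List.pyGetD_eq_getElem m _ h0 hi1]
    simp
  have e2 : PySem.List.pyGetD (m.map (fun row => PySem.List.pyGetD row c 0)) (i + 1) 0
      = PySem.List.pyGetD (PySem.List.pyGetD m (i + 1) []) c 0 := by
    rw [PySem.List.pyGetD_eq_getElem _ _ (by omega) (by simpa using hi2),
        PySem.List.pyGetD_eq_getElem m _ (by omega) hi2]
    simp
  simp [pvCond, e1, e2]


-- A as a map over the column indices
theorem pvAEqMap (m : List (List Int)) :
    columnas_ordenadas m
    = (List.range (PySem.List.pyGetD m 0 []).length).map
        (fun (j : Nat) => ordenados (columna m (j : Int))) := by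
  unfold columnas_ordenadas
  have hstep : (fun (res : List Bool) (i : Int) =>
        if ordenados (columna m i) == true then res ++ [true] else res ++ [false])
      = fun res i => res ++ [ordenados (columna m i)] := by
    funext res i
    cases h : ordenados (columna m i) <;> simp_all
  rw [hstep, PySem.List.foldl_append_singleton_eq_map (fun i => ordenados (columna m i)),
      List.nil_append, PySem.List.pyRange_zero_nat, List.map_map]
  simp [Function.comp]

-- setting one position of a mapped range to false
theorem pvSetFalse (w : Nat) (a : Int) (h0 : 0 ≤ a) (g : Nat → Bool) :
    PySem.List.pySetD ((List.range w).map g) a false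
    = (List.range w).map (fun (j : Nat) => if (j : Int) = a then false else g j) := by
  rw [PySem.List.pySetD_of_nonneg _ _ h0]
  apply List.ext_getElem
  · simp
  · intro i hi hj
    simp only [List.getElem_set, List.getElem_map, List.getElem_range]
    by_cases h : (i : Int) = a
    · have : a.toNat = i := by omega
      simp [this, h]
    · have h2 : ¬ (a.toNat = i) := by omega
      rw [if_neg h2, if_neg h]

-- the inner column loop ANDs the pair condition into every running boolean
theorem pvInner (P : Int → Prop) [DecidablePred P] (w : Nat) (k : Nat) :
    ∀ (a : Int) (g : Nat → Bool), 0 ≤ a → ((w : Int) - a).toNat = k →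
    (PySem.List.pyRange a (w : Int) 1).foldl
      (fun res c => if ¬ P c then PySem.List.pySetD res c false else res)
      ((List.range w).map g)
    = (List.range w).map (fun (j : Nat) => if a ≤ (j : Int) then g j && decide (P (j : Int)) else g j) := by
  induction k with
  | zero =>
    intro a g ha hk
    have hnil : PySem.List.pyRange a (w : Int) 1 = [] :=
      PySem.List.pyRange_one_eq_nil (by omega)
    rw [hnil]
    simp only [List.foldl_nil]
    apply List.map_congr_left
    intro j hj
    have : ¬ (a ≤ (j : Int)) := by
      have := List.mem_range.1 hj; omega
    simp [this]
  | succ k ih =>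
    intro a g ha hk
    have hab : a < (w : Int) := by omega
    rw [PySem.List.pyRange_one_cons hab]
    simp only [List.foldl_cons]
    have haw : a.toNat < w := by omega
    have hacast : a = ((a.toNat : Nat) : Int) := by omega
    by_cases hP : P a
    · rw [if_neg (by simpa using hP), ih (a + 1) g (by omega) (by omega)]
      apply List.map_congr_left
      intro j hj
      by_cases hja : (j : Int) = a
      · have h1 : a ≤ (j : Int) := by omega
        have h2 : ¬ (a + 1 ≤ (j : Int)) := by omega
        rw [if_neg h2, if_pos h1, hja]
        simp [hP]
      · by_cases h1 : a ≤ (j : Int)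
        · have h2 : a + 1 ≤ (j : Int) := by omega
          simp [h1, h2]
        · have h2 : ¬ (a + 1 ≤ (j : Int)) := by omega
          simp [h1, h2]
    · rw [if_pos (by simpa using hP), pvSetFalse w a ha g,
          ih (a + 1) _ (by omega) (by omega)]
      apply List.map_congr_left
      intro j hj
      by_cases hja : (j : Int) = a
      · have h1 : a ≤ (j : Int) := by omega
        have h2 : ¬ (a + 1 ≤ (j : Int)) := by omega
        rw [if_neg h2, if_pos hja, if_pos h1]
        simp [hja, hP]
      · by_cases h1 : a ≤ (j : Int)
        · have h2 : a + 1 ≤ (j : Int) := by omega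
          simp [h1, h2, hja]
        · have h2 : ¬ (a + 1 ≤ (j : Int)) := by omega
          simp [h1, h2, hja]

-- specialisation: inner loop from index 0
theorem pvInner0 (P : Int → Prop) [DecidablePred P] (w : Nat) (g : Nat → Bool) :
    (PySem.List.pyRange 0 (w : Int) 1).foldl
      (fun res c => if ¬ P c then PySem.List.pySetD res c false else res)
      ((List.range w).map g)
    = (List.range w).map (fun (j : Nat) => g j && decide (P (j : Int))) := by
  rw [pvInner P w ((w : Int) - 0).toNat 0 g le_rfl rfl]
  apply List.map_congr_left
  intro j hj
  simp

-- the outer row loop accumulates the `all` over the remaining row pairs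
theorem pvOuter (m : List (List Int)) (w : Nat) (k : Nat) :
    ∀ (a : Int) (g : Nat → Bool), 0 ≤ a → ((m.length : Int) - 1 - a).toNat = k →
    (PySem.List.pyRange a ((m.length : Int) - 1) 1).foldl
      (fun res i =>
        (PySem.List.pyRange 0 (w : Int) 1).foldl
          (fun res c =>
            if ¬ (PySem.List.pyGetD (PySem.List.pyGetD m i []) c 0
                  < PySem.List.pyGetD (PySem.List.pyGetD m (i + 1) []) c 0)
            then PySem.List.pySetD res c false else res) res)
      ((List.range w).map g)
    = (List.range w).map
        (fun (j : Nat) => g j &&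
          (PySem.List.pyRange a ((m.length : Int) - 1) 1).all
            (fun i => pvCond m i ((j : Nat) : Int))) := by
  induction k with
  | zero =>
    intro a g ha hk
    have hnil : PySem.List.pyRange a ((m.length : Int) - 1) 1 = [] :=
      PySem.List.pyRange_one_eq_nil (by omega)
    rw [hnil]
    simp
  | succ k ih =>
    intro a g ha hk
    have hab : a < (m.length : Int) - 1 := by omega
    rw [PySem.List.pyRange_one_cons hab]
    simp only [List.foldl_cons]
    rw [pvInner0 (fun c => PySem.List.pyGetD (PySem.List.pyGetD m a []) c 0
          < PySem.List.pyGetD (PySem.List.pyGetD m (a + 1) []) c 0) w g,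
        ih (a + 1) _ (by omega) (by omega)]
    apply List.map_congr_left
    intro j hj
    simp only [List.all_cons, pvCond, Bool.and_assoc]

-- B as the same map over column indices
theorem pvBEqMap (m : List (List Int)) :
    columnas_ordenadas_alt m
    = (List.range (PySem.List.pyGetD m 0 []).length).map
        (fun (j : Nat) =>
          (PySem.List.pyRange 0 ((m.length : Int) - 1) 1).all
            (fun i => decide (pvCond m i ((j : Nat) : Int)))) := by
  unfold columnas_ordenadas_alt
  simp only []
  have hrep : List.replicate (((PySem.List.pyGetD m 0 []).length : Int)).toNat true
      = (List.range (PySem.List.pyGetD m 0 []).length).map (fun _ => true) := by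
    simp [List.map_const']
  rw [hrep,
      pvOuter m (PySem.List.pyGetD m 0 []).length
        (((m.length : Int) - 1 - 0).toNat) 0 (fun _ => true) le_rfl rfl]
  simp

-- ===== VERDICT (by name: the statement is the Claim_ definition above) =====
theorem columnas_ordenadas_spec : Claim_equal_columnas_ordenadas := by
  intro m _ hpre
  unfold Spec_columnas_ordenadas
  rw [pvAEqMap, pvBEqMap]
  apply List.map_congr_left
  intro j hj
  exact pvColPointwise m hpre.1 (j : Int)
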